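-- pv_equiv track=rewrite | github.com/mlc-tools/mlc-tools | mlc_tools/base/generator_data_storage_base.py | get_class_name_from_data_name
-- ===== SOURCE A (Python) =====
-- def get_class_name_from_data_name(name):
--     """
--     convert name_foo - > DataNameFoo
--     :param name: name in lowercase
--     :return: name of class in uppercase
--     """
--     upper = True
--     name_ = ''
--     for char in name:
--         if char == '_':
--             upper = True
--             continue
--         name_ += char if not upper else char.upper()
--         upper = False
--     return 'Data' + name_
-- ===== SOURCE B (Python) =====
-- def get_class_name_from_data_name(name):
--     """
--     convert name_foo - > DataNameFoo
--     :param name: name in lowercase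
--     :return: name of class in uppercase
--     """
--     parts = name.split('_')
--     return 'Data' + ''.join(p[0].upper() + p[1:] if p else '' for p in parts)
-- ===== Notes on version B (the rewrite author's own statement) =====
-- stated objective: faster
-- what changed: Replaces the character-by-character scan with an upper-flag state machine and repeated string concatenation by splitting on the underscore separator and joining each part with its first character uppercased in a single join.
import Mathlib
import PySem

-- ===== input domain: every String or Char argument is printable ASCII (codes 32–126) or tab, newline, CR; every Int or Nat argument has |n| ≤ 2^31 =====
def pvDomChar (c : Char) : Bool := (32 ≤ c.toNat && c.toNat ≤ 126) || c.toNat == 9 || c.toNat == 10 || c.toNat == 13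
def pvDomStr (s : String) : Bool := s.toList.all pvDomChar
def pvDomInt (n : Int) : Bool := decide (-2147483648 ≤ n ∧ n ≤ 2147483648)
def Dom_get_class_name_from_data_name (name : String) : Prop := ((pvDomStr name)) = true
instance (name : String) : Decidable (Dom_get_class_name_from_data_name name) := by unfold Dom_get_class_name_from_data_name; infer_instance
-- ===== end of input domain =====

-- B replaces A's upper-flag character state machine with repeated += by split on underscore + capitalize-first-of-each-part + one join (measured faster).

-- ===== PORT A =====
-- the 'for char in name' loop with state (upper, name_)
def pvLoopA : List Char → Bool → List Char → List Char
  | [], _, acc => acc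
  | c :: cs, up, acc =>
    if c = '_' then pvLoopA cs true acc
    else pvLoopA cs false (acc ++ [if up then PySem.Chars.upperChar c else c])

def get_class_name_from_data_name (name : String) : String :=
  String.ofList ("Data".toList ++ pvLoopA name.toList true [])

-- ===== PORT B =====
-- p[0].upper() + p[1:] if p else ''
def pvCap : List Char → List Char
  | [] => []
  | c :: cs => PySem.Chars.upperChar c :: cs

def get_class_name_from_data_name_alt (name : String) : String :=
  String.ofList ("Data".toList ++
    PySem.Chars.join [] ((PySem.Chars.splitOn name.toList ['_']).map pvCap))

-- ===== PRECONDITION & SPEC =====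
def Spec_get_class_name_from_data_name (name : String) (out : String) : Prop := out = get_class_name_from_data_name_alt name
instance (name : String) (out : String) : Decidable (Spec_get_class_name_from_data_name name out) := by unfold Spec_get_class_name_from_data_name; infer_instance

-- ===== CLAIM (what is proved, stated in full; the proofs are below) =====
def Claim_equal_get_class_name_from_data_name : Prop := ∀ (name : String), Dom_get_class_name_from_data_name name → Spec_get_class_name_from_data_name name (get_class_name_from_data_name name)

-- ===== LEMMAS AND PROOFS =====

-- reference splitter: pvSplit l cur = remaining split of l with reversed current part cur
def pvSplit : List Char → List Char → List (List Char)
  | [], cur => [cur.reverse]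
  | c :: cs, cur => if c = '_' then cur.reverse :: pvSplit cs [] else pvSplit cs (c :: cur)

lemma go_eq (fuel : Nat) (l cur : List Char) (acc : List (List Char)) (h : l.length ≤ fuel) :
    PySem.Chars.splitOn.go ['_'] fuel l cur acc = acc.reverse ++ pvSplit l cur := by
  induction fuel generalizing l cur acc with
  | zero =>
    have hl : l = [] := List.length_eq_zero_iff.mp (Nat.le_zero.mp h)
    subst hl
    simp [PySem.Chars.splitOn.go, pvSplit]
  | succ n ih =>
    cases l with
    | nil => simp [PySem.Chars.splitOn.go, pvSplit]
    | cons c cs =>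
      simp only [PySem.Chars.splitOn.go]
      by_cases hc : c = '_'
      · subst hc
        have hp : List.isPrefixOf ['_'] ('_' :: cs) = true := by simp [List.isPrefixOf]
        simp only [hp, if_pos]
        rw [ih _ _ _ (by simpa using Nat.le_of_succ_le_succ (by simpa using h))]
        simp [pvSplit]
      · have hp : List.isPrefixOf ['_'] (c :: cs) = false := by
          simp [List.isPrefixOf]; exact fun hh => (hc hh.symm).elim
        simp only [hp, Bool.false_eq_true, if_false]
        rw [ih _ _ _ (by simpa using Nat.le_of_succ_le_succ (by simpa using h))]
        simp [pvSplit, hc]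

lemma splitOn_eq_pvSplit (l : List Char) :
    PySem.Chars.splitOn l ['_'] = pvSplit l [] := by
  have := go_eq (l.length + 1) l [] [] (by omega)
  simpa [PySem.Chars.splitOn] using this

lemma join_nil_eq_flatten (ps : List (List Char)) :
    PySem.Chars.join [] ps = ps.flatten := by
  induction ps with
  | nil => simp [PySem.Chars.join, List.intercalate]
  | cons p ps ih =>
    cases ps with
    | nil => simp [PySem.Chars.join, List.intercalate]
    | cons q qs =>
      simp only [PySem.Chars.join, List.intercalate] at ih ⊢
      rw [List.intersperse_cons₂]
      simp only [List.flatten_cons] at ih ⊢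
      rw [ih]
      simp

lemma pvSplit_cur (cs cur : List Char) :
    pvSplit cs cur = (cur.reverse ++ (pvSplit cs []).headI) :: (pvSplit cs []).tail := by
  induction cs generalizing cur with
  | nil => simp [pvSplit]
  | cons c rest ih =>
    by_cases hc : c = '_'
    · simp [pvSplit, hc]
    · simp only [pvSplit, hc, if_false]
      rw [ih (c :: cur), ih [c]]
      simp

lemma pvLoopA_acc (cs : List Char) (up : Bool) (acc : List Char) :
    pvLoopA cs up acc = acc ++ pvLoopA cs up [] := by
  induction cs generalizing up acc with
  | nil => simp [pvLoopA]
  | cons c rest ih =>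
    by_cases hc : c = '_'
    · subst hc
      simp only [pvLoopA, if_pos]
      exact ih true acc
    · simp only [pvLoopA, hc, if_false]
      rw [ih false (acc ++ _), ih false ([] ++ _)]
      simp

lemma pvLoopA_eq (cs : List Char) :
    pvLoopA cs true [] = ((pvSplit cs []).map pvCap).flatten ∧
    pvLoopA cs false [] = (pvSplit cs []).headI ++ (((pvSplit cs []).tail).map pvCap).flatten := by
  induction cs with
  | nil => simp [pvLoopA, pvSplit, pvCap]
  | cons c rest ih =>
    obtain ⟨ihT, ihF⟩ := ih
    by_cases hc : c = '_'
    · subst hc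
      constructor
      · simp [pvLoopA, pvSplit, ihT, pvCap]
      · simp [pvLoopA, pvSplit, ihT]
    · constructor
      · simp only [pvLoopA, hc, if_false]
        conv_rhs => rw [pvSplit]
        rw [if_neg hc, pvLoopA_acc, ihF, pvSplit_cur rest [c]]
        simp [pvCap]
      · simp only [pvLoopA, hc, if_false]
        conv_rhs => rw [pvSplit]
        rw [if_neg hc, pvLoopA_acc, ihF, pvSplit_cur rest [c]]
        simp

-- ===== VERDICT (by name: the statement is the Claim_ definition above) =====
theorem get_class_name_from_data_name_spec : Claim_equal_get_class_name_from_data_name := by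
  intro name _
  unfold Spec_get_class_name_from_data_name get_class_name_from_data_name get_class_name_from_data_name_alt
  rw [splitOn_eq_pvSplit, join_nil_eq_flatten, (pvLoopA_eq name.toList).1]
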